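-- pv_equiv track=rewrite | github.com/pypi-data/pypi-mirror-275 | packages/pbx-code-owners/pbx_code_owners-1.2.0a8-py3-none-any.whl/code_owners/parser.py | match_any_path
-- ===== SOURCE A (Python) =====
-- def match_any_path(
--     sub_paths: list[str], base_paths: list[str], excluded_paths: list[str]
-- ) -> bool:
--     if "." in base_paths:
--         return True
--
--     matched_paths = (
--         sub_path
--         for sub_path in sub_paths
--         for base_path in base_paths
--         if sub_path.startswith(base_path)
--         and not any(
--             sub_path.startswith(excluded_path) for excluded_path in excluded_paths
--         )
--     )
--     try:
--         next(matched_paths)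
--     except StopIteration:
--         return False
--     return True
-- ===== SOURCE B (Python) =====
-- def match_any_path(
--     sub_paths: list[str], base_paths: list[str], excluded_paths: list[str]
-- ) -> bool:
--     if "." in base_paths:
--         return True
--     bset = set(base_paths)
--     eset = set(excluded_paths)
--     for sp in sub_paths:
--         matched = False
--         excluded = False
--         for i in range(len(sp) + 1):
--             q = sp[:i]
--             if q in bset:
--                 matched = True
--             if q in eset:
--                 excluded = True
--         if matched and not excluded:
--             return True
--     return False
-- ===== Notes on version B (the rewrite author's own statement) =====
-- stated objective: faster
-- what changed: B builds hash sets of the base and excluded prefixes once and, for each sub_path, enumerates the sub_path's own prefixes and tests set membership, so the inner scans over base_paths and excluded_paths disappear: O(S*B*E*L) nested scans become O((B+E)*L + S*L^2) with O(1)-average hash lookups.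
import Mathlib
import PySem

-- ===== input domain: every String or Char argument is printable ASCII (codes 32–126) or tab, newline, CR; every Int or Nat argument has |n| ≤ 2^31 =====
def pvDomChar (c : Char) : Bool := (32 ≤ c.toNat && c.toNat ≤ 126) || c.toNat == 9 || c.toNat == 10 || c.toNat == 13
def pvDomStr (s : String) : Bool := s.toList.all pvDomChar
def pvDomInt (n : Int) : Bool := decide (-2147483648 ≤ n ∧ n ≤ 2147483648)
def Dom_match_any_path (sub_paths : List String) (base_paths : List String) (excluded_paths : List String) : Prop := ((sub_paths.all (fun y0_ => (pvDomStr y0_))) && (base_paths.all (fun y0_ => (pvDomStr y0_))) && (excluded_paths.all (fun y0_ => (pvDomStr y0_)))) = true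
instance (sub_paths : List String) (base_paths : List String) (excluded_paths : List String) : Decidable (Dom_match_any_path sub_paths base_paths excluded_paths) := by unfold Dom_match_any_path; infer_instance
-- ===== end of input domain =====

-- B replaces A's nested startswith scans by hash sets of the prefix lists plus, per sub_path,
-- one pass over the sub_path's own prefixes testing set membership (objective: faster; measured).
-- ===== PORT A =====
-- A: generator over (sub_path, base_path) pairs yielding sub_path when it starts with
-- base_path and is not excluded; try/next() tests whether the generator is nonempty.
def match_any_path (sub_paths : List String) (base_paths : List String) (excluded_paths : List String) : Bool :=
  if base_paths.contains "." then true
  else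
    let matched_paths := sub_paths.flatMap (fun sub_path =>
      base_paths.filterMap (fun base_path =>
        if PySem.Str.startswith sub_path base_path
            && !(excluded_paths.any (fun excluded_path => PySem.Str.startswith sub_path excluded_path))
        then some sub_path else none))
    !matched_paths.isEmpty

-- ===== PORT B =====
-- B: bset/eset = set(base_paths)/set(excluded_paths); for each sp, a fold over
-- range(len(sp)+1) (indices nonnegative, so sp[:i] = take i) accumulating the two flags
-- (matched, excluded) via set membership of the prefix q; early 'return True' = List.any.
def match_any_path_alt (sub_paths : List String) (base_paths : List String) (excluded_paths : List String) : Bool :=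
  if base_paths.contains "." then true
  else
    let bset : PySem.Set String := PySem.Set.ofList base_paths
    let eset : PySem.Set String := PySem.Set.ofList excluded_paths
    sub_paths.any (fun sp =>
      let flags := (List.range (sp.toList.length + 1)).foldl
        (fun (acc : Bool × Bool) i =>
          let q := String.ofList (sp.toList.take i)
          (acc.1 || PySem.Set.contains bset q, acc.2 || PySem.Set.contains eset q))
        (false, false)
      flags.1 && !flags.2)

-- ===== PRECONDITION & SPEC =====
def Spec_match_any_path (sub_paths : List String) (base_paths : List String) (excluded_paths : List String) (out : Bool) : Prop := out = match_any_path_alt sub_paths base_paths excluded_paths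
instance (sub_paths : List String) (base_paths : List String) (excluded_paths : List String) (out : Bool) : Decidable (Spec_match_any_path sub_paths base_paths excluded_paths out) := by unfold Spec_match_any_path; infer_instance

-- ===== CLAIM =====
def Claim_equal_match_any_path : Prop := ∀ (sub_paths : List String) (base_paths : List String) (excluded_paths : List String), Dom_match_any_path sub_paths base_paths excluded_paths → Spec_match_any_path sub_paths base_paths excluded_paths (match_any_path sub_paths base_paths excluded_paths)

-- ===== LEMMAS AND PROOFS =====

-- the two-flag fold is (a || any f, b || any g)
theorem foldl_two_flags {α : Type} (f g : α → Bool) :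
    ∀ (l : List α) (a b : Bool),
      l.foldl (fun (acc : Bool × Bool) i => (acc.1 || f i, acc.2 || g i)) (a, b)
        = (a || l.any f, b || l.any g) := by
  intro l
  induction l with
  | nil => simp
  | cons x xs ih => intro a b; simp [List.foldl_cons, ih, Bool.or_assoc]

-- enumerating sp's prefixes and testing membership in P equals scanning P with startswith
theorem prefix_any (sp : String) (P : List String) :
    ((List.range (sp.toList.length + 1)).any
        (fun i => PySem.Set.contains (PySem.Set.ofList P) (String.ofList (sp.toList.take i))))
      = P.any (fun p => PySem.Str.startswith sp p) := by
  rw [Bool.eq_iff_iff]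
  simp only [List.any_eq_true, List.mem_range, PySem.Set.contains_iff, PySem.Set.mem_ofList, PySem.Str.startswith_eq, PySem.Chars.startswith_iff]
  constructor
  · rintro ⟨i, _, hmem⟩
    refine ⟨String.ofList (sp.toList.take i), hmem, ?_⟩
    simpa using List.take_prefix i sp.toList
  · rintro ⟨p, hmem, hpre⟩
    refine ⟨p.toList.length, by have := hpre.length_le; omega, ?_⟩
    rw [← List.prefix_iff_eq_take.mp hpre, String.ofList_toList]
    exact hmem

-- ===== VERDICT =====
theorem match_any_path_spec : Claim_equal_match_any_path := by
  intro s b e _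
  unfold Spec_match_any_path match_any_path match_any_path_alt
  split
  · rfl
  · simp only [foldl_two_flags, Bool.false_or, prefix_any]
    rw [Bool.eq_iff_iff]
    simp
    tauto
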